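-- pv_equiv track=rewrite | github.com/VlaTal1/decision_making_theory | lb3/utils.py | compose_arrays_to_graph
-- ===== SOURCE A (Python) =====
-- def compose_arrays_to_graph(arrays):
--     graph = {}
--     for array in arrays:
--         for i in range(len(array) - 1):
--             current_node = array[i]
--             next_node = array[i + 1]
--             if current_node not in graph:
--                 graph[current_node] = []
--             if next_node not in graph[current_node]:
--                 graph[current_node].append(next_node)
--         # Добавляем связь для последнего узла в массиве
--         last_node = array[-1]
--         if last_node not in graph:
--             graph[last_node] = []
--     return graph
-- ===== SOURCE B (Python) =====
-- def compose_arrays_to_graph(arrays):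
--     # Non-incremental "group by key" algorithm: no dict is built while scanning.
--     # Key order: first occurrence over the concatenation of all arrays (for a
--     # non-empty array this is exactly pair-heads followed by its last element).
--     pairs = [p for a in arrays for p in zip(a, a[1:])]
--     keys = dict.fromkeys(x for a in arrays for x in a)
--     # Successors of k: the next-nodes of all pairs headed by k, in global pair
--     # order, collapsed to first occurrences.
--     return {k: list(dict.fromkeys(n for c, n in pairs if c == k)) for k in keys}
-- ===== Notes on version B (the rewrite author's own statement) =====
-- stated objective: alternative
-- what changed: Replaces A's incremental dict build (one streaming pass appending each successor after a membership test) by a non-incremental group-by: compute the key order once as the ordered dedup of the concatenated arrays, collect all consecutive pairs into one flat list, and produce each key's successors by filtering that pair list and collapsing to first occurrences.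
-- crash fix: On any input containing an empty inner array A raises IndexError at array[-1]; B returns the graph built from the remaining arrays (an empty array contributes no nodes). — e.g. on compose_arrays_to_graph([[1, 2], []]): A raises IndexError, B returns [(1, [2]), (2, [])]
import Mathlib
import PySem

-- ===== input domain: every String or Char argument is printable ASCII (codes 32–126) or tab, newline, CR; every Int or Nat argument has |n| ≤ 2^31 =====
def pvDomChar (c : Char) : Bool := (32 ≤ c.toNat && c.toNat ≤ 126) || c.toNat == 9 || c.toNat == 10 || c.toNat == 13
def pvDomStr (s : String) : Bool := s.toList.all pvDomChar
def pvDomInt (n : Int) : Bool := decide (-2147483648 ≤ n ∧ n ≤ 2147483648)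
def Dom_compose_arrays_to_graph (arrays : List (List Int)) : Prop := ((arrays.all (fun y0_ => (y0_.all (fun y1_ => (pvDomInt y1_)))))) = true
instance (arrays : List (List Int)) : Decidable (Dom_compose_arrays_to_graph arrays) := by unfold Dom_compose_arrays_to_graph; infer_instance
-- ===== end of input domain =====

-- B replaces A's incremental dict build by a non-incremental group-by (key order = ordered
-- dedup of the concatenated arrays; successors of k = next-nodes of the pairs headed by k,
-- deduped); alternative algorithm, similar cost. A raises IndexError on an empty inner
-- array (array[-1]): Pre_ excludes exactly those inputs; B returns a value there.

-- ===== PORT A =====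
def compose_arrays_to_graph (arrays : List (List Int)) : List (Int × List Int) :=
  let graph : PySem.Dict Int (List Int) :=
    arrays.foldl (fun graph array =>
      let graph :=
        (PySem.List.pyRange 0 ((array.length : Int) - 1) 1).foldl (fun graph i =>
          let current_node := PySem.List.pyGetD array i 0
          let next_node := PySem.List.pyGetD array (i + 1) 0
          let graph := if graph.contains current_node then graph
                       else graph.insert current_node []
          let succs := graph.getD current_node []
          if next_node ∈ succs then graph
          else graph.insert current_node (succs ++ [next_node])) graph
      -- last_node = array[-1]; IndexError on empty array is excluded by Pre_
      match PySem.List.pyGet? array (-1) with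
      | none => graph
      | some last_node =>
          if graph.contains last_node then graph else graph.insert last_node [])
      PySem.Dict.empty
  graph.items

-- ===== PORT B =====
def compose_arrays_to_graph_alt (arrays : List (List Int)) : List (Int × List Int) :=
  -- pairs: all consecutive pairs of all arrays, in order
  let pairs : List (Int × Int) := arrays.flatMap (fun a => a.zip a.tail)
  -- keys = dict.fromkeys(x for a in arrays for x in a): ordered dedup of the concatenation
  let keys : List Int := PySem.List.dedup (arrays.flatMap (fun a => a))
  -- {k: list(dict.fromkeys(n for c, n in pairs if c == k)) for k in keys}
  keys.map (fun k => (k, PySem.List.dedup ((pairs.filter (fun p => p.1 == k)).map (fun p => p.2))))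

-- ===== PRECONDITION & SPEC =====
-- Pre_ excludes exactly the inputs where the Python A raises IndexError (array[-1] on an
-- empty inner array).
def Pre_compose_arrays_to_graph (arrays : List (List Int)) : Prop :=
  ∀ a ∈ arrays, a ≠ []
instance (arrays : List (List Int)) : Decidable (Pre_compose_arrays_to_graph arrays) := by
  unfold Pre_compose_arrays_to_graph; infer_instance

def pvWitness_compose_arrays_to_graph : List (List Int) := [[1, 2, 1, 3], [2, 3], [4]]

-- On any input containing an empty inner array A raises IndexError at array[-1]; B returns
-- the graph built from the remaining arrays (an empty array contributes no nodes).
def Raises_compose_arrays_to_graph (arrays : List (List Int)) : Prop :=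
  ∃ a ∈ arrays, a = []
instance (arrays : List (List Int)) : Decidable (Raises_compose_arrays_to_graph arrays) := by
  unfold Raises_compose_arrays_to_graph; infer_instance

def pvRaiseWitness_compose_arrays_to_graph : List (List Int) := [[1, 2], []]
def pvRaiseWitnessOut_compose_arrays_to_graph : List (Int × List Int) := [(1, [2]), (2, [])]

def Spec_compose_arrays_to_graph (arrays : List (List Int)) (out : List (Int × List Int)) : Prop := out = compose_arrays_to_graph_alt arrays
instance (arrays : List (List Int)) (out : List (Int × List Int)) : Decidable (Spec_compose_arrays_to_graph arrays out) := by unfold Spec_compose_arrays_to_graph; infer_instance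

-- ===== CLAIM (what is proved, stated in full; the proofs are below) =====
def Claim_equal_compose_arrays_to_graph : Prop := ∀ (arrays : List (List Int)), Dom_compose_arrays_to_graph arrays → Pre_compose_arrays_to_graph arrays → Spec_compose_arrays_to_graph arrays (compose_arrays_to_graph arrays)
def Claim_raises_compose_arrays_to_graph : Prop := (∀ (arrays : List (List Int)), Dom_compose_arrays_to_graph arrays → Raises_compose_arrays_to_graph arrays → ¬ Pre_compose_arrays_to_graph arrays) ∧ (Dom_compose_arrays_to_graph (pvRaiseWitness_compose_arrays_to_graph) ∧ Raises_compose_arrays_to_graph (pvRaiseWitness_compose_arrays_to_graph) ∧ compose_arrays_to_graph_alt (pvRaiseWitness_compose_arrays_to_graph) = pvRaiseWitnessOut_compose_arrays_to_graph)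

-- ===== LEMMAS AND PROOFS =====

-- collapse: dedup every value of a dict, keys and order unchanged
def pvCollapse (g : PySem.Dict Int (List Int)) : PySem.Dict Int (List Int) :=
  PySem.Dict.mk (g.items.map (fun p => (p.1, PySem.List.dedup p.2)))

theorem pvCollapse_keys (g : PySem.Dict Int (List Int)) :
    (pvCollapse g).keys = g.keys := by
  simp [pvCollapse, PySem.Dict.keys]

theorem pvCollapse_contains (g : PySem.Dict Int (List Int)) (k : Int) :
    (pvCollapse g).contains k = g.contains k := by
  rw [PySem.Dict.contains_eq_decide_mem_keys, PySem.Dict.contains_eq_decide_mem_keys,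
    pvCollapse_keys]

theorem pvCollapse_get? (g : PySem.Dict Int (List Int)) (k : Int) (h : g.keys.Nodup) :
    (pvCollapse g).get? k = (g.get? k).map PySem.List.dedup := by
  cases hg : g.get? k with
  | none =>
      rw [PySem.Dict.get?_eq_none_iff_not_mem_keys] at hg
      simp only [Option.map_none]
      rw [PySem.Dict.get?_eq_none_iff_not_mem_keys, pvCollapse_keys]; exact hg
  | some v =>
      have hm := PySem.Dict.mem_items_of_get?_eq_some _ hg
      have hm' : (k, PySem.List.dedup v) ∈ (pvCollapse g).items :=
        List.mem_map_of_mem (f := fun p => (p.1, PySem.List.dedup p.2)) hm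
      have hn : (pvCollapse g).keys.Nodup := by rw [pvCollapse_keys]; exact h
      simpa using PySem.Dict.get?_of_mem_items _ hm' hn

theorem pvDedup_append_singleton (v : List Int) (n : Int) :
    PySem.List.dedup (v ++ [n]) =
      if n ∈ v then PySem.List.dedup v else PySem.List.dedup v ++ [n] := by
  have : PySem.List.dedup (v ++ [n]) = PySem.Set.add (PySem.List.dedup v) n := by
    simp [PySem.Set.ofList_eq_foldl, List.foldl_append]
  rw [this, PySem.Set.add]
  by_cases hn : n ∈ v
  · rw [if_pos hn, if_pos]
    simpa [PySem.Set.contains] using (PySem.List.mem_dedup v n).2 hn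
  · rw [if_neg hn, if_neg]
    simp only [PySem.Set.contains]
    simpa using fun hc => hn ((PySem.List.mem_dedup v n).1 (by simpa using hc))

-- the per-pair step of A, as a function
def pvStepA (g : PySem.Dict Int (List Int)) (c n : Int) : PySem.Dict Int (List Int) :=
  let g := if g.contains c then g else g.insert c []
  let succs := g.getD c []
  if n ∈ succs then g else g.insert c (succs ++ [n])

-- every key of a dict g with g.contains c = false differs from c
theorem pvKey_ne (g : PySem.Dict Int (List Int)) (c : Int) (hc : g.contains c = false)
    (p : Int × List Int) (hp : p ∈ g.items) : p.1 ≠ c := by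
  intro hpc
  have : g.contains p.1 = true :=
    (PySem.Dict.contains_iff_mem_keys g p.1).2 (PySem.Dict.mem_keys_of_mem_items _ hp)
  rw [hpc, hc] at this; exact Bool.false_ne_true this

-- with Nodup keys, an item whose key is c carries the value get? returns
theorem pvItem_val (g : PySem.Dict Int (List Int)) (c : Int) (v : List Int)
    (h : g.keys.Nodup) (hv : g.get? c = some v)
    (p : Int × List Int) (hp : p ∈ g.items) (hpc : p.1 = c) : p.2 = v := by
  have := PySem.Dict.get?_of_mem_items _ hp h
  rw [hpc, hv] at this
  exact Option.some.inj this.symm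

theorem pvCollapse_items (g : PySem.Dict Int (List Int)) :
    (pvCollapse g).items = g.items.map (fun p => (p.1, PySem.List.dedup p.2)) := rfl

theorem pvStep_comm (g : PySem.Dict Int (List Int)) (c n : Int) (h : g.keys.Nodup) :
    pvStepA (pvCollapse g) c n = pvCollapse (g.modify c [] (· ++ [n])) := by
  by_cases hc : g.contains c = true
  · -- key already present, with value v
    rw [PySem.Dict.contains_eq_isSome_get?] at hc
    obtain ⟨v, hv⟩ := Option.isSome_iff_exists.1 hc
    have hc' : g.contains c = true := by rw [PySem.Dict.contains_eq_isSome_get?, hv]; rfl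
    have hcc : (pvCollapse g).contains c = true := by rw [pvCollapse_contains]; exact hc'
    have hgD : g.getD c [] = v := PySem.Dict.getD_of_get?_eq_some _ _ hv
    have hgDc : (pvCollapse g).getD c [] = PySem.List.dedup v := by
      exact PySem.Dict.getD_of_get?_eq_some _ _ (by rw [pvCollapse_get? g c h, hv]; rfl)
    simp only [pvStepA, PySem.Dict.modify, hcc, if_true, hgDc, hgD]
    by_cases hn : n ∈ v
    · rw [if_pos ((PySem.List.mem_dedup v n).2 hn)]
      apply PySem.Dict.ext
      simp only [pvCollapse_items]
      rw [PySem.Dict.items_insert_of_contains _ _ hc', List.map_map]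
      apply List.map_congr_left
      intro p hp
      by_cases hpc : p.1 = c
      · have hp2 := pvItem_val g c v h hv p hp hpc
        simp only [Function.comp, hpc, hp2, beq_self_eq_true, if_true,
          pvDedup_append_singleton, hn]
      · simp only [Function.comp, beq_iff_eq, hpc, if_false]
    · rw [if_neg (fun hmem => hn ((PySem.List.mem_dedup v n).1 hmem))]
      apply PySem.Dict.ext
      rw [PySem.Dict.items_insert_of_contains _ _ hcc]
      simp only [pvCollapse_items]
      rw [PySem.Dict.items_insert_of_contains _ _ hc', List.map_map, List.map_map]
      apply List.map_congr_left
      intro p hp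
      by_cases hpc : p.1 = c
      · have hp2 := pvItem_val g c v h hv p hp hpc
        simp only [Function.comp, hpc, hp2, beq_self_eq_true, if_true,
          pvDedup_append_singleton, hn, if_false]
      · simp only [Function.comp, beq_iff_eq, hpc, if_false]
  · -- key absent: A inserts [] then appends; the duplicated build appends to the default []
    have hc' : g.contains c = false := by simpa using hc
    have hcc : (pvCollapse g).contains c = false := by rw [pvCollapse_contains]; exact hc'
    have hgD : g.getD c [] = [] := PySem.Dict.getD_of_not_contains _ _ hc'
    simp only [pvStepA, PySem.Dict.modify, hcc, Bool.false_eq_true, if_false,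
      PySem.Dict.getD_insert_self, hgD, List.not_mem_nil, List.nil_append]
    apply PySem.Dict.ext
    rw [PySem.Dict.items_insert_of_contains _ _ (PySem.Dict.contains_insert_self _ _ _),
      PySem.Dict.items_insert_of_not_contains _ _ hcc]
    simp only [pvCollapse_items]
    rw [PySem.Dict.items_insert_of_not_contains _ _ hc', List.map_append, List.map_append,
      List.map_map]
    congr 1
    · apply List.map_congr_left
      intro p hp
      have := pvKey_ne g c hc' p hp
      simp only [Function.comp, beq_iff_eq, this, if_false]
    · simp [PySem.List.dedup, PySem.Set.ofList, PySem.Set.add]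

theorem pvNodup_modify (g : PySem.Dict Int (List Int)) (c : Int) (f : List Int → List Int)
    (h : g.keys.Nodup) : (g.modify c [] f).keys.Nodup := by
  unfold PySem.Dict.modify
  exact PySem.Dict.nodup_keys_insert g c _ h

theorem pvLast_comm (g : PySem.Dict Int (List Int)) (l : Int) :
    (if (pvCollapse g).contains l then pvCollapse g else (pvCollapse g).insert l []) =
      pvCollapse (if g.contains l then g else g.insert l []) := by
  by_cases hc : g.contains l = true
  · rw [if_pos (by rw [pvCollapse_contains]; exact hc), if_pos hc]
  · have hc' : g.contains l = false := by simpa using hc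
    rw [if_neg (by simp [pvCollapse_contains, hc']), if_neg (by simp [hc'])]
    apply PySem.Dict.ext
    rw [PySem.Dict.items_insert_of_not_contains _ _ (by rw [pvCollapse_contains]; exact hc')]
    simp only [pvCollapse_items]
    rw [PySem.Dict.items_insert_of_not_contains _ _ hc', List.map_append]
    rfl

theorem pvNodup_last (g : PySem.Dict Int (List Int)) (l : Int) (h : g.keys.Nodup) :
    (if g.contains l then g else g.insert l []).keys.Nodup := by
  split
  · exact h
  · exact PySem.Dict.nodup_keys_insert g l _ h

-- A's index loop over range(len(a)-1) is the fold over consecutive pairs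
theorem pvPairs_eq (a : List Int) :
    (PySem.List.pyRange 0 ((a.length : Int) - 1) 1).map
        (fun i => (PySem.List.pyGetD a i 0, PySem.List.pyGetD a (i + 1) 0)) =
      a.zip a.tail := by
  apply List.ext_getElem
  · simp only [List.length_map, PySem.List.length_pyRange_one, List.length_zip,
      List.length_tail]
    omega
  · intro k h1 h2
    have hk : k < ((a.length : Int) - 1 - 0).toNat := by
      simpa [PySem.List.length_pyRange_one] using h1
    have hk1 : (k : Int) < (a.length : Int) := by omega
    have hk2 : (k : Int) + 1 < (a.length : Int) := by omega
    simp only [List.getElem_map, PySem.List.getElem_pyRange_one, List.getElem_zip]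
    rw [PySem.List.pyGetD_eq_getElem a 0 (by omega) (by omega),
      PySem.List.pyGetD_eq_getElem a 0 (by omega) (by omega)]
    congr 1
    · congr 1; omega
    · rw [List.getElem_tail]; congr 1; omega

theorem pvInner_comm (ps : List (Int × Int)) (g : PySem.Dict Int (List Int))
    (h : g.keys.Nodup) :
    ps.foldl (fun g p => pvStepA g p.1 p.2) (pvCollapse g) =
      pvCollapse (ps.foldl (fun g p => g.modify p.1 [] (· ++ [p.2])) g) := by
  induction ps generalizing g with
  | nil => rfl
  | cons p t ih =>
      simp only [List.foldl_cons]
      rw [pvStep_comm g p.1 p.2 h, ih _ (pvNodup_modify g p.1 _ h)]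

theorem pvNodup_inner (ps : List (Int × Int)) (g : PySem.Dict Int (List Int))
    (h : g.keys.Nodup) :
    (ps.foldl (fun g p => g.modify p.1 [] (· ++ [p.2])) g).keys.Nodup := by
  induction ps generalizing g with
  | nil => exact h
  | cons p t ih => exact ih _ (pvNodup_modify g p.1 _ h)

-- proof-side names for A's per-array body and the duplicated-build per-array body
def pvLastStep (graph : PySem.Dict Int (List Int)) (o : Option Int) : PySem.Dict Int (List Int) :=
  match o with
  | none => graph
  | some last => if graph.contains last then graph else graph.insert last []

def pvBodyA (graph : PySem.Dict Int (List Int)) (array : List Int) : PySem.Dict Int (List Int) :=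
  pvLastStep
    ((PySem.List.pyRange 0 ((array.length : Int) - 1) 1).foldl (fun graph i =>
      pvStepA graph (PySem.List.pyGetD array i 0) (PySem.List.pyGetD array (i + 1) 0)) graph)
    (PySem.List.pyGet? array (-1))

def pvBodyB (graph : PySem.Dict Int (List Int)) (array : List Int) : PySem.Dict Int (List Int) :=
  pvLastStep
    ((array.zip array.tail).foldl (fun graph p => graph.modify p.1 [] (· ++ [p.2])) graph)
    (PySem.List.pyGet? array (-1))

theorem pvBody_comm (g : PySem.Dict Int (List Int)) (a : List Int) (h : g.keys.Nodup) :
    pvBodyA (pvCollapse g) a = pvCollapse (pvBodyB g a) := by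
  unfold pvBodyA pvBodyB
  have h2 := pvInner_comm (a.zip a.tail) g h
  rw [← pvPairs_eq a, List.foldl_map] at h2
  rw [h2, pvPairs_eq a]
  cases PySem.List.pyGet? a (-1) with
  | none => rfl
  | some l => exact pvLast_comm _ l

theorem pvNodup_bodyB (g : PySem.Dict Int (List Int)) (a : List Int) (h : g.keys.Nodup) :
    (pvBodyB g a).keys.Nodup := by
  unfold pvBodyB
  have h2 := pvNodup_inner (a.zip a.tail) g h
  cases PySem.List.pyGet? a (-1) with
  | none => exact h2
  | some l => exact pvNodup_last _ l h2

theorem pvOuter (t : List (List Int)) : ∀ (g : PySem.Dict Int (List Int)), g.keys.Nodup →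
    t.foldl pvBodyA (pvCollapse g) = pvCollapse (t.foldl pvBodyB g) := by
  induction t with
  | nil => intro g _; rfl
  | cons a t ih =>
      intro g h
      simp only [List.foldl_cons]
      rw [pvBody_comm g a h]
      exact ih _ (pvNodup_bodyB g a h)

theorem pvNodup_outer (t : List (List Int)) (g : PySem.Dict Int (List Int))
    (h : g.keys.Nodup) : (t.foldl pvBodyB g).keys.Nodup := by
  induction t generalizing g with
  | nil => exact h
  | cons a t ih => exact ih _ (pvNodup_bodyB g a h)

theorem pvCollapse_empty : pvCollapse PySem.Dict.empty = PySem.Dict.empty := rfl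

-- === characterization of the duplicated build: keys and values ===

-- the pair heads of a list are the list without its last element
theorem pvZipFst (l : List Int) : (l.zip l.tail).map Prod.fst = l.dropLast := by
  apply List.ext_getElem
  · simp only [List.length_map, List.length_zip, List.length_tail, List.length_dropLast]
    omega
  · intro i h1 h2
    simp [List.getElem_zip, List.getElem_dropLast]

theorem pvKeys_bodyB (g : PySem.Dict Int (List Int)) (a : List Int) :
    (pvBodyB g a).keys = PySem.Set.update g.keys a := by
  rcases List.eq_nil_or_concat a with rfl | ⟨b, x, rfl⟩
  · simp [pvBodyB, pvLastStep, PySem.List.pyGet?_neg_one, PySem.Set.update]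
  · unfold pvBodyB pvLastStep
    simp only [List.concat_eq_append]
    rw [PySem.List.pyGet?_neg_one_append_singleton]
    dsimp only
    have hd : (((b ++ [x]).zip (b ++ [x]).tail).foldl
        (fun g p => g.modify p.1 [] (· ++ [p.2])) g).keys = PySem.Set.update g.keys b := by
      rw [PySem.Dict.keys_foldl_modify_key (key := Prod.fst), pvZipFst, List.dropLast_concat]
    rw [PySem.Set.update_append]
    show _ = PySem.Set.update (PySem.Set.update g.keys b) [x]
    rw [PySem.Set.update_cons, PySem.Set.update_nil]
    rw [PySem.Set.add]
    have hmem : PySem.Set.contains (PySem.Set.update g.keys b) x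
        = (((b ++ [x]).zip (b ++ [x]).tail).foldl
            (fun g p => g.modify p.1 [] (· ++ [p.2])) g).contains x := by
      rw [PySem.Dict.contains_eq_decide_mem_keys, hd]
      simp [PySem.Set.contains]
    rw [hmem]
    by_cases hc : (((b ++ [x]).zip (b ++ [x]).tail).foldl
        (fun g p => g.modify p.1 [] (· ++ [p.2])) g).contains x = true
    · rw [if_pos hc, if_pos hc, hd]
    · rw [Bool.not_eq_true] at hc
      rw [if_neg (by simp [hc]), if_neg (by simp [hc]),
        PySem.Dict.keys_insert_of_not_contains _ _ hc, hd]

theorem pvKeys_outer (t : List (List Int)) (g : PySem.Dict Int (List Int)) :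
    (t.foldl pvBodyB g).keys = PySem.Set.update g.keys (t.flatMap (fun a => a)) := by
  induction t generalizing g with
  | nil => simp [PySem.Set.update_nil]
  | cons a t ih =>
      simp only [List.foldl_cons, List.flatMap_cons]
      rw [ih, pvKeys_bodyB, PySem.Set.update_append]

theorem pvGetD_bodyB (g : PySem.Dict Int (List Int)) (a : List Int) (k : Int) :
    (pvBodyB g a).getD k [] =
      g.getD k [] ++ ((a.zip a.tail).filter (fun p => p.1 == k)).map (fun p => p.2) := by
  unfold pvBodyB pvLastStep
  have hfold := PySem.Dict.getD_foldl_modify_append (a.zip a.tail) g k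
  cases PySem.List.pyGet? a (-1) with
  | none => exact hfold
  | some l =>
      dsimp only
      by_cases hc : ((a.zip a.tail).foldl
          (fun g p => g.modify p.1 [] (· ++ [p.2])) g).contains l = true
      · rw [if_pos hc]; exact hfold
      · rw [Bool.not_eq_true] at hc
        rw [if_neg (by simp [hc]), PySem.Dict.getD_insert]
        split_ifs with hkl
        · subst hkl
          rw [← hfold, PySem.Dict.getD_of_not_contains _ _ hc]
        · exact hfold

theorem pvGetD_outer (t : List (List Int)) (g : PySem.Dict Int (List Int)) (k : Int) :
    (t.foldl pvBodyB g).getD k [] =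
      g.getD k [] ++
        ((t.flatMap (fun a => a.zip a.tail)).filter (fun p => p.1 == k)).map (fun p => p.2) := by
  induction t generalizing g with
  | nil => simp
  | cons a t ih =>
      simp only [List.foldl_cons, List.flatMap_cons, List.filter_append, List.map_append]
      rw [ih, pvGetD_bodyB, List.append_assoc]

-- ===== VERDICT (by name: the statement is the Claim_ definition above) =====
theorem compose_arrays_to_graph_spec : Claim_equal_compose_arrays_to_graph := by
  intro arrays _ _
  unfold Spec_compose_arrays_to_graph compose_arrays_to_graph compose_arrays_to_graph_alt
  show (arrays.foldl pvBodyA PySem.Dict.empty).items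
      = (PySem.List.dedup (arrays.flatMap (fun a => a))).map (fun k =>
          (k, PySem.List.dedup (((arrays.flatMap (fun a => a.zip a.tail)).filter
            (fun p => p.1 == k)).map (fun p => p.2))))
  rw [← pvCollapse_empty, pvOuter arrays PySem.Dict.empty PySem.Dict.nodup_keys_empty,
    pvCollapse_items]
  have hnd := pvNodup_outer arrays PySem.Dict.empty PySem.Dict.nodup_keys_empty
  rw [PySem.Dict.items_eq_map_keys _ hnd ([] : List Int), List.map_map]
  rw [pvKeys_outer arrays PySem.Dict.empty]
  have hkeys : PySem.Set.update ((PySem.Dict.empty : PySem.Dict Int (List Int)).keys)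
      (arrays.flatMap (fun a => a)) = PySem.List.dedup (arrays.flatMap (fun a => a)) := by
    rw [show ((PySem.Dict.empty : PySem.Dict Int (List Int)).keys) = ([] : List Int) from rfl,
      PySem.Set.update_nil_left]; simp
  rw [hkeys]
  apply List.map_congr_left
  intro k _
  simp only [Function.comp]
  rw [pvGetD_outer arrays PySem.Dict.empty k]
  simp [PySem.Dict.getD_empty]

theorem compose_arrays_to_graph_raises : Claim_raises_compose_arrays_to_graph := by
  unfold Claim_raises_compose_arrays_to_graph
  constructor
  · intro arrays _ ⟨a, ha, hae⟩ hpre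
    exact hpre a ha hae
  · exact ⟨by decide, ⟨[], by decide, rfl⟩, by decide⟩

-- self-check: the raise witness's B-value, read off the raises theorem
theorem compose_arrays_to_graph_raises_ok :
    compose_arrays_to_graph_alt pvRaiseWitness_compose_arrays_to_graph
      = pvRaiseWitnessOut_compose_arrays_to_graph := by
  have h := compose_arrays_to_graph_raises
  unfold Claim_raises_compose_arrays_to_graph at h
  exact h.2.2.2
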